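-- pv_equiv track=rewrite | github.com/lodomo/LeetCode | 0035_-_Search_Insert_Position/0035.py | greatest_less_than
-- ===== SOURCE A (Python) =====
-- def greatest_less_than(arr, target):
--     left = 0
--     right = len(arr) - 1
--     result = -1
--
--     while left <= right:
--         mid = (left + right) // 2
--         if arr[mid] < target:
--             result = mid
--             left = mid + 1
--         else:
--             right = mid - 1
--     return result
-- ===== SOURCE B (Python) =====
-- def greatest_less_than(arr, target):
--     def go(lo, n):
--         # search the length-n segment starting at lo; return the recorded index or -1
--         if n == 0:
--             return -1
--         k = (n - 1) // 2
--         mid = lo + k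
--         if arr[mid] < target:
--             r = go(mid + 1, n - 1 - k)
--             return mid if r == -1 else r
--         return go(lo, k)
--     return go(0, len(arr))
-- ===== Notes on version B (the rewrite author's own statement) =====
-- stated objective: alternative
-- what changed: Replaced the accumulator-threading Int-bounds while loop with an accumulator-free recursion over (offset, segment-length) natural numbers: the midpoint is computed from the segment length (lo + (n-1)//2), the base case is an empty segment returning -1, and the recorded index is combined on return rather than carried in loop state.
import Mathlib
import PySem

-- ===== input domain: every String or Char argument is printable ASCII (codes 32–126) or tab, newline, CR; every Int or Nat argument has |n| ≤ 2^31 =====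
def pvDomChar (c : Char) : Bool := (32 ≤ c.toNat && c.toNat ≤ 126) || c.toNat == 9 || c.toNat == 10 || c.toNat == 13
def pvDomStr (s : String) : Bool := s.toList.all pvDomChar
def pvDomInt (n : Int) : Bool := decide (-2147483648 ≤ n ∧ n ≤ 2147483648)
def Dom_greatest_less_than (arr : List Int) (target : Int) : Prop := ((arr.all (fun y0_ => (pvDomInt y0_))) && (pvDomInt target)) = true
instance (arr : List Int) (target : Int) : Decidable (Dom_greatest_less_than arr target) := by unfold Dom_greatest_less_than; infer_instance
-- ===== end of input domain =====

-- B replaces A's accumulator-threading Int-bounds while loop with an accumulator-free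
-- recursion over (offset, segment length) naturals (objective: alternative decomposition).

-- ===== PORT A =====
-- the while loop of A, state (left, right, result); fuel is only a totality device (the range
-- shrinks every iteration, so fuel = arr.length + 1 is never exhausted); arr[mid] via
-- PySem.List.pyGet? (mid is always in range when the loop body runs, so .getD 0 is unreachable)
def pvLoopA (arr : List Int) (target : Int) : Nat → Int → Int → Int → Int
  | 0, _, _, result => result
  | fuel + 1, left, right, result =>
    if left ≤ right then
      let mid := PySem.Int.floordiv (left + right) 2
      if (PySem.List.pyGet? arr mid).getD 0 < target then
        pvLoopA arr target fuel (mid + 1) right mid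
      else
        pvLoopA arr target fuel left (mid - 1) result
    else result

def greatest_less_than (arr : List Int) (target : Int) : Int :=
  pvLoopA arr target (arr.length + 1) 0 ((arr.length : Int) - 1) (-1)

-- ===== PORT B =====
-- B's helper go(lo, n): recursion on the segment LENGTH n (a natural number), so it is
-- structurally terminating — no fuel; arr[mid] with mid a nonnegative in-range index is
-- arr.getD mid 0 (exact on the reachable indices, lo + n ≤ arr.length)
def pvGoB (arr : List Int) (target : Int) (lo : Nat) : Nat → Int
  | 0 => -1
  | n + 1 =>
    let k := n / 2
    let mid := lo + k
    if arr.getD mid 0 < target then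
      let r := pvGoB arr target (mid + 1) (n - k)
      if r = -1 then (mid : Int) else r
    else pvGoB arr target lo k

def greatest_less_than_alt (arr : List Int) (target : Int) : Int :=
  pvGoB arr target 0 arr.length

-- ===== PRECONDITION & SPEC =====
def Spec_greatest_less_than (arr : List Int) (target : Int) (out : Int) : Prop := out = greatest_less_than_alt arr target
instance (arr : List Int) (target : Int) (out : Int) : Decidable (Spec_greatest_less_than arr target out) := by unfold Spec_greatest_less_than; infer_instance

-- ===== CLAIM (what is proved, stated in full; the proofs are below) =====
def Claim_equal_greatest_less_than : Prop := ∀ (arr : List Int) (target : Int), Dom_greatest_less_than arr target → Spec_greatest_less_than arr target (greatest_less_than arr target)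

-- ===== LEMMAS AND PROOFS =====

-- A's loop on the segment [lo, lo+n-1] equals "B's result on (lo, n), falling back to the
-- carried accumulator when B reports -1" (for any fuel ≥ n)
theorem pvLoopA_eq_pvGoB (arr : List Int) (target : Int) :
    ∀ (n fuel lo : Nat) (result : Int), n ≤ fuel →
      pvLoopA arr target fuel lo ((lo : Int) + n - 1) result =
        (if pvGoB arr target lo n = -1 then result else pvGoB arr target lo n) := by
  intro n
  induction n using Nat.strong_induction_on with
  | _ n ih =>
    intro fuel lo result hfuel
    match n, fuel with
    | 0, 0 => simp [pvLoopA, pvGoB]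
    | 0, fuel + 1 =>
      simp only [pvLoopA, pvGoB]
      rw [if_neg (by push_cast; omega)]
      simp
    | m + 1, fuel + 1 =>
      have hle : (lo : Int) ≤ (lo : Int) + (m + 1 : Nat) - 1 := by push_cast; omega
      have hmid : PySem.Int.floordiv ((lo : Int) + ((lo : Int) + (m + 1 : Nat) - 1)) 2
          = ((lo + m / 2 : Nat) : Int) := by
        rw [PySem.Int.floordiv_eq_ediv_of_pos (by omega)]
        push_cast
        omega
      have hget : (PySem.List.pyGet? arr ((lo + m / 2 : Nat) : Int)).getD 0
          = arr.getD (lo + m / 2) 0 := by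
        rw [PySem.List.pyGet?_natCast]; simp [List.getD]
      rw [pvLoopA]
      simp only [hle, if_pos, hmid, hget]
      rw [pvGoB]
      simp only []
      by_cases hc : arr.getD (lo + m / 2) 0 < target
      · simp only [hc, if_pos]
        have harg : ((lo + m / 2 : Nat) : Int) + 1 = ((lo + m / 2 + 1 : Nat) : Int) := by
          push_cast; omega
        have harg2 : (lo : Int) + (m + 1 : Nat) - 1
            = ((lo + m / 2 + 1 : Nat) : Int) + ((m - m / 2 : Nat) : Int) - 1 := by
          push_cast [Nat.sub_add_cancel]; omega
        rw [harg, harg2, ih (m - m / 2) (by omega) fuel _ _ (by omega)]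
        split_ifs <;> simp_all
      · simp only [hc, if_false]
        have harg : ((lo + m / 2 : Nat) : Int) - 1 = (lo : Int) + ((m / 2 : Nat) : Int) - 1 := by
          push_cast; omega
        rw [harg, ih (m / 2) (by omega) fuel _ _ (by omega)]

-- ===== VERDICT (by name: the statement is the Claim_ definition above) =====
theorem greatest_less_than_spec : Claim_equal_greatest_less_than := by
  intro arr target _
  unfold Spec_greatest_less_than greatest_less_than greatest_less_than_alt
  have h := pvLoopA_eq_pvGoB arr target arr.length (arr.length + 1) 0 (-1) (by omega)
  simp only [Nat.cast_zero, zero_add] at h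
  rw [h]
  split <;> simp_all
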